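-- pv_equiv track=rewrite | github.com/fepegar/advent-of-code-2017 | day_11/day_11.py | steps_to_return
-- ===== SOURCE A (Python) =====
-- DIRECTIONS = {
--     # disable convention messages
--     # pylint: disable=C
--     'n' : ( 0,  1, -1),
--     'ne': ( 1,  0, -1),
--     'se': ( 1, -1,  0),
--     's' : ( 0, -1,  1),
--     'sw': (-1,  0,  1),
--     'nw': (-1,  1,  0),
-- }
--
-- def add(coordsA, coordsB):
--     return [a + b for a, b in zip(coordsA, coordsB)]
--
-- def steps_to_return(line, far=False):
--     steps = line.split(',')
--     coordinates = [0, 0, 0]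
--     furthest = 0
--     for step in steps:
--         coordinates = add(coordinates, DIRECTIONS[step])
--         distance = max(map(abs, coordinates))
--         if far:
--             furthest = max(distance, furthest)
--     if far:
--         return furthest
--     else:
--         return distance
-- ===== SOURCE B (Python) =====
-- AXIAL = {
--     'n' : ( 0,  1),
--     'ne': ( 1,  0),
--     'se': ( 1, -1),
--     's' : ( 0, -1),
--     'sw': (-1,  0),
--     'nw': (-1,  1),
-- }
--
-- def hexdist(q, r):
--     return (abs(q) + abs(r) + abs(q + r)) // 2
--
-- def steps_to_return(line, far=False):
--     steps = line.split(',')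
--     # endpoint first, by summing axial deltas (no running position needed)
--     q = sum(AXIAL[s][0] for s in steps)
--     r = sum(AXIAL[s][1] for s in steps)
--     if not far:
--         return hexdist(q, r)
--     # for the furthest point, walk the path BACKWARD from the endpoint
--     furthest = hexdist(q, r)
--     for s in reversed(steps):
--         dq, dr = AXIAL[s]
--         q -= dq
--         r -= dr
--         furthest = max(furthest, hexdist(q, r))
--     return furthest
-- ===== Notes on version B (the rewrite author's own statement) =====
-- stated objective: alternative
-- what changed: B never tracks a running position over the forward pass: it first computes the endpoint by summing axial deltas (for far=False this closed form is the whole answer, no per-step distance is ever computed), and for far=True it recovers the earlier positions by walking the path BACKWARD from the endpoint, subtracting deltas and maxing the axial distance (|q|+|r|+|q+r|)//2, instead of A's forward cubic-coordinate running-max loop.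
import Mathlib
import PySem

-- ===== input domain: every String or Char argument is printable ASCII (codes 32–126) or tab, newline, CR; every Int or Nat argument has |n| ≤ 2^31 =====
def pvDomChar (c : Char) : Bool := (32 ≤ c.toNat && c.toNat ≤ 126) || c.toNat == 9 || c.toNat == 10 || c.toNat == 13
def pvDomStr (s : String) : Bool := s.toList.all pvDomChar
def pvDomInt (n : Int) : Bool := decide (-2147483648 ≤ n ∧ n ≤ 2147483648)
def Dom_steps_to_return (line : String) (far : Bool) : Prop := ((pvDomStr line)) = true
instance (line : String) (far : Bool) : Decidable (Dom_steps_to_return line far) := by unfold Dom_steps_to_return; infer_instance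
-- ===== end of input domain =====

-- B computes the endpoint first by summing axial deltas (the whole answer when far=False) and,
-- for far=True, walks the path backward from the endpoint to max the closed-form axial distance
-- (objective: alternative).

-- ===== PORT A =====
def pvDirections : PySem.Dict String (Int × Int × Int) :=
  PySem.Dict.ofList [("n", (0, 1, -1)), ("ne", (1, 0, -1)), ("se", (1, -1, 0)),
                     ("s", (0, -1, 1)), ("sw", (-1, 0, 1)), ("nw", (-1, 1, 0))]

-- add(coordsA, coordsB)
def pvAdd (coordsA coordsB : List Int) : List Int :=
  (coordsA.zip coordsB).map (fun p => p.1 + p.2)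

-- the for-loop of A; state = (coordinates, furthest, distance); returns (furthest, distance).
-- DIRECTIONS[step] raises KeyError on an unknown token: those inputs are outside Pre_,
-- there the port uses the default (0,0,0).
def pvLoopA (far : Bool) : List String → List Int → Int → Int → Int × Int
  | [], _, furthest, distance => (furthest, distance)
  | step :: rest, coordinates, furthest, distance =>
    let d := pvDirections.getD step (0, 0, 0)
    let coordinates' := pvAdd coordinates [d.1, d.2.1, d.2.2]
    let distance' := (PySem.List.max? (coordinates'.map (fun x => |x|)) (fun v => v)).getD distance
    let furthest' := if far then max distance' furthest else furthest
    pvLoopA far rest coordinates' furthest' distance'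

def steps_to_return (line : String) (far : Bool) : Int :=
  let steps := (PySem.Str.split? line ",").getD []
  let r := pvLoopA far steps [0, 0, 0] 0 0
  if far then r.1 else r.2

-- ===== PORT B =====
def pvAxial : PySem.Dict String (Int × Int) :=
  PySem.Dict.ofList [("n", (0, 1)), ("ne", (1, 0)), ("se", (1, -1)),
                     ("s", (0, -1)), ("sw", (-1, 0)), ("nw", (-1, 1))]

-- hexdist(q, r)
def pvHex (q r : Int) : Int := PySem.Int.floordiv (|q| + |r| + |q + r|) 2

-- q = sum(AXIAL[s][0] for s in steps); AXIAL[step] raises KeyError outside Pre_,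
-- there the port uses the default (0,0).
def pvSumQ (steps : List String) : Int := (steps.map (fun s => (pvAxial.getD s (0, 0)).1)).sum
def pvSumR (steps : List String) : Int := (steps.map (fun s => (pvAxial.getD s (0, 0)).2)).sum

-- the backward for-loop of B; state = (q, r, furthest)
def pvBackLoop : List String → Int → Int → Int → Int
  | [], _, _, furthest => furthest
  | s :: rest, q, r, furthest =>
    let d := pvAxial.getD s (0, 0)
    pvBackLoop rest (q - d.1) (r - d.2) (max furthest (pvHex (q - d.1) (r - d.2)))

def steps_to_return_alt (line : String) (far : Bool) : Int :=
  let steps := (PySem.Str.split? line ",").getD []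
  let q := pvSumQ steps
  let r := pvSumR steps
  if far then pvBackLoop steps.reverse q r (pvHex q r)
  else pvHex q r

-- ===== PRECONDITION & SPEC =====
-- Pre_ excludes exactly the inputs containing a token that is not a direction name, on which
-- A (and B) raises KeyError.
def Pre_steps_to_return (line : String) (far : Bool) : Prop :=
  ∀ t ∈ (PySem.Str.split? line ",").getD [], t ∈ (["n", "ne", "se", "s", "sw", "nw"] : List String)
instance (line : String) (far : Bool) : Decidable (Pre_steps_to_return line far) := by
  unfold Pre_steps_to_return; infer_instance

def pvWitness_steps_to_return : String × Bool := ("ne,ne,sw,s", true)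

def Spec_steps_to_return (line : String) (far : Bool) (out : Int) : Prop := out = steps_to_return_alt line far
instance (line : String) (far : Bool) (out : Int) : Decidable (Spec_steps_to_return line far out) := by unfold Spec_steps_to_return; infer_instance

-- ===== CLAIM (what is proved, stated in full; the proofs are below) =====
def Claim_equal_steps_to_return : Prop := ∀ (line : String) (far : Bool), Dom_steps_to_return line far → Pre_steps_to_return line far → Spec_steps_to_return line far (steps_to_return line far)

-- ===== LEMMAS AND PROOFS =====

-- dictionary lookups on the two literal direction tables
lemma pv_dirA_n : pvDirections.getD "n" (0, 0, 0) = (0, 1, -1) := by decide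
lemma pv_dirA_ne : pvDirections.getD "ne" (0, 0, 0) = (1, 0, -1) := by decide
lemma pv_dirA_se : pvDirections.getD "se" (0, 0, 0) = (1, -1, 0) := by decide
lemma pv_dirA_s : pvDirections.getD "s" (0, 0, 0) = (0, -1, 1) := by decide
lemma pv_dirA_sw : pvDirections.getD "sw" (0, 0, 0) = (-1, 0, 1) := by decide
lemma pv_dirA_nw : pvDirections.getD "nw" (0, 0, 0) = (-1, 1, 0) := by decide
lemma pv_dirB_n : pvAxial.getD "n" (0, 0) = (0, 1) := by decide
lemma pv_dirB_ne : pvAxial.getD "ne" (0, 0) = (1, 0) := by decide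
lemma pv_dirB_se : pvAxial.getD "se" (0, 0) = (1, -1) := by decide
lemma pv_dirB_s : pvAxial.getD "s" (0, 0) = (0, -1) := by decide
lemma pv_dirB_sw : pvAxial.getD "sw" (0, 0) = (-1, 0) := by decide
lemma pv_dirB_nw : pvAxial.getD "nw" (0, 0) = (-1, 1) := by decide

-- proof helper: the per-prefix distance list of the path (hex distance after each step)
def pvDList : List String → Int → Int → List Int
  | [], _, _ => []
  | t :: ts, q, r =>
    let d := pvAxial.getD t (0, 0)
    pvHex (q + d.1) (r + d.2) :: pvDList ts (q + d.1) (r + d.2)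

-- proof helper: hex distances of the positions BEFORE each step (prefixes 0 .. n-1)
def pvPrefixes : List String → Int → Int → List Int
  | [], _, _ => []
  | t :: ts, q, r =>
    let d := pvAxial.getD t (0, 0)
    pvHex q r :: pvPrefixes ts (q + d.1) (r + d.2)

-- the cube distance max(|a|,|b|,|-a-b|) equals the axial closed form (|a|+|b|+|a+b|)//2
lemma pv_dist_eq (a b d : Int) :
    (PySem.List.max? [|a|, |b|, |-a - b|] (fun v => v)).getD d = pvHex a b := by
  have h2 : pvHex a b = (|a| + |b| + |a + b|) / 2 := by
    simp only [pvHex, PySem.Int.floordiv]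
    exact Int.fdiv_eq_ediv_of_nonneg _ (by positivity)
  rw [h2]
  simp only [PySem.List.max?_id_cons, Option.getD_some, List.foldl, Int.abs_eq_natAbs]
  omega

lemma pv_sumQ_cons (t : String) (ts : List String) :
    pvSumQ (t :: ts) = (pvAxial.getD t (0, 0)).1 + pvSumQ ts := by
  simp [pvSumQ]

lemma pv_sumR_cons (t : String) (ts : List String) :
    pvSumR (t :: ts) = (pvAxial.getD t (0, 0)).2 + pvSumR ts := by
  simp [pvSumR]

lemma pv_sumQ_reverse (l : List String) : pvSumQ l.reverse = pvSumQ l := by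
  simp [pvSumQ]

lemma pv_sumR_reverse (l : List String) : pvSumR l.reverse = pvSumR l := by
  simp [pvSumR]

-- pushing an extra element into the seed of a max-fold
lemma pv_foldl_max_out (L : List Int) : ∀ a b : Int,
    List.foldl max (max a b) L = max (List.foldl max a L) b := by
  induction L with
  | nil => intro a b; rfl
  | cons x t ih =>
    intro a b
    simp only [List.foldl]
    rw [max_right_comm a b x, ih]

-- running pvBackLoop over an append
lemma pv_back_append (l1 l2 : List String) : ∀ q r f : Int,
    pvBackLoop (l1 ++ l2) q r f
      = pvBackLoop l2 (q - pvSumQ l1) (r - pvSumR l1) (pvBackLoop l1 q r f) := by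
  induction l1 with
  | nil => intro q r f; simp [pvBackLoop, pvSumQ, pvSumR]
  | cons t ts ih =>
    intro q r f
    simp only [List.cons_append, pvBackLoop, pv_sumQ_cons, pv_sumR_cons]
    rw [ih]
    congr 1 <;> ring

-- the backward loop, started at the endpoint, folds max over the prefix distances
lemma pv_back_rel (ts : List String) : ∀ q r f : Int,
    pvBackLoop ts.reverse (q + pvSumQ ts) (r + pvSumR ts) f
      = List.foldl max f (pvPrefixes ts q r) := by
  induction ts with
  | nil => intro q r f; simp [pvBackLoop, pvPrefixes, pvSumQ, pvSumR]
  | cons t ts ih =>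
    intro q r f
    have hrev : (t :: ts).reverse = ts.reverse ++ [t] := by simp
    rw [hrev, pv_back_append, pv_sumQ_reverse, pv_sumR_reverse, pv_sumQ_cons, pv_sumR_cons]
    have h1 : q + ((pvAxial.getD t (0, 0)).1 + pvSumQ ts) - pvSumQ ts
        = q + (pvAxial.getD t (0, 0)).1 := by ring
    have h2 : r + ((pvAxial.getD t (0, 0)).2 + pvSumR ts) - pvSumR ts
        = r + (pvAxial.getD t (0, 0)).2 := by ring
    have h3 : q + ((pvAxial.getD t (0, 0)).1 + pvSumQ ts)
        = (q + (pvAxial.getD t (0, 0)).1) + pvSumQ ts := by ring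
    have h4 : r + ((pvAxial.getD t (0, 0)).2 + pvSumR ts)
        = (r + (pvAxial.getD t (0, 0)).2) + pvSumR ts := by ring
    rw [h1, h2, h3, h4, ih]
    simp only [pvBackLoop]
    have h5 : q + (pvAxial.getD t (0, 0)).1 - (pvAxial.getD t (0, 0)).1 = q := by ring
    have h6 : r + (pvAxial.getD t (0, 0)).2 - (pvAxial.getD t (0, 0)).2 = r := by ring
    rw [h5, h6, ← pv_foldl_max_out]
    simp [pvPrefixes]

-- max-folding the prefix distances from the endpoint = max-folding the per-step distances from the origin
lemma pv_prefix_fold (ts : List String) : ∀ q r : Int,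
    List.foldl max (pvHex (q + pvSumQ ts) (r + pvSumR ts)) (pvPrefixes ts q r)
      = List.foldl max (pvHex q r) (pvDList ts q r) := by
  induction ts with
  | nil => intro q r; simp [pvPrefixes, pvDList, pvSumQ, pvSumR]
  | cons t ts ih =>
    intro q r
    simp only [pvPrefixes, pvDList, List.foldl, pv_sumQ_cons, pv_sumR_cons]
    have h3 : q + ((pvAxial.getD t (0, 0)).1 + pvSumQ ts)
        = (q + (pvAxial.getD t (0, 0)).1) + pvSumQ ts := by ring
    have h4 : r + ((pvAxial.getD t (0, 0)).2 + pvSumR ts)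
        = (r + (pvAxial.getD t (0, 0)).2) + pvSumR ts := by ring
    rw [pv_foldl_max_out, h3, h4, ih, ← pv_foldl_max_out, max_comm]

-- the last element of e :: L with default d is the last element of L with default e
lemma pv_getLast_cons (L : List Int) (e d : Int) :
    (e :: L).getLast?.getD d = L.getLast?.getD e := by
  cases L with
  | nil => rfl
  | cons x t =>
    rw [List.getLast?_cons_cons, List.getLast?_eq_some_getLast (l := x :: t) (List.cons_ne_nil x t)]
    rfl

-- the last per-step distance is the distance of the endpoint
lemma pv_dlist_last (ts : List String) : ∀ q r : Int,
    (pvDList ts q r).getLastD (pvHex q r) = pvHex (q + pvSumQ ts) (r + pvSumR ts) := by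
  induction ts with
  | nil => intro q r; simp [pvDList, pvSumQ, pvSumR]
  | cons t ts ih =>
    intro q r
    simp only [pvDList, pv_sumQ_cons, pv_sumR_cons]
    have h3 : q + ((pvAxial.getD t (0, 0)).1 + pvSumQ ts)
        = (q + (pvAxial.getD t (0, 0)).1) + pvSumQ ts := by ring
    have h4 : r + ((pvAxial.getD t (0, 0)).2 + pvSumR ts)
        = (r + (pvAxial.getD t (0, 0)).2) + pvSumR ts := by ring
    rw [h3, h4, ← ih]
    simp only [List.getLastD_eq_getLast?]
    exact pv_getLast_cons _ _ _

-- one step of the two representations, given the relation already holds for the tail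
lemma pv_tail (ts : List String)
    (ih : ∀ (q r z furthest distance : Int) (far : Bool), z = -q - r →
      pvLoopA far ts [q, r, z] furthest distance
        = ((if far then (pvDList ts q r).foldl max furthest else furthest),
           (pvDList ts q r).getLastD distance))
    (a b c furthest distance : Int) (far : Bool) (hc : c = -a - b) :
    pvLoopA far ts [a, b, c]
        (if far then max ((PySem.List.max? [|a|, |b|, |c|] (fun v => v)).getD distance) furthest
         else furthest)
        ((PySem.List.max? [|a|, |b|, |c|] (fun v => v)).getD distance)
      = ((if far then (pvHex a b :: pvDList ts a b).foldl max furthest else furthest),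
         (pvHex a b :: pvDList ts a b).getLastD distance) := by
  subst hc
  rw [pv_dist_eq a b distance, ih a b (-a - b) _ _ far rfl]
  cases far <;> simp [List.foldl, List.getLastD_eq_getLast?, pv_getLast_cons, max_comm]

-- the joint loop invariant: A's loop on cube coordinates [q, r, z] with z = -q-r computes the
-- running max (over furthest) and the last element (over distance) of the per-step distance list
lemma pv_loop_rel (ts : List String) :
    ∀ (q r z furthest distance : Int) (far : Bool),
    (∀ t ∈ ts, t ∈ (["n", "ne", "se", "s", "sw", "nw"] : List String)) → z = -q - r →
    pvLoopA far ts [q, r, z] furthest distance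
      = ((if far then (pvDList ts q r).foldl max furthest else furthest),
         (pvDList ts q r).getLastD distance) := by
  induction ts with
  | nil => intro q r z furthest distance far _ hz; simp [pvLoopA, pvDList]
  | cons t ts ih =>
    intro q r z furthest distance far h hz
    have ht := h t (List.mem_cons_self ..)
    have hts : ∀ t ∈ ts, t ∈ (["n", "ne", "se", "s", "sw", "nw"] : List String) :=
      fun x hx => h x (List.mem_cons_of_mem _ hx)
    fin_cases ht <;>
    · simp only [pvLoopA, pvDList, pvAdd,
        pv_dirA_n, pv_dirA_ne, pv_dirA_se, pv_dirA_s, pv_dirA_sw, pv_dirA_nw,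
        pv_dirB_n, pv_dirB_ne, pv_dirB_se, pv_dirB_s, pv_dirB_sw, pv_dirB_nw,
        List.zip_cons_cons, List.zip_nil_right, List.map]
      refine pv_tail ts (fun q' r' z' f' d' far' hz' => ih q' r' z' f' d' far' hts hz')
        _ _ _ _ _ far ?_
      omega

-- ===== VERDICT (by name: the statement is the Claim_ definition above) =====
theorem steps_to_return_spec : Claim_equal_steps_to_return := by
  intro line far _ hpre
  unfold Spec_steps_to_return
  simp only [steps_to_return, steps_to_return_alt]
  rw [pv_loop_rel ((PySem.Str.split? line ",").getD []) 0 0 0 0 0 far hpre (by norm_num)]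
  cases far with
  | false =>
    have h := pv_dlist_last ((PySem.Str.split? line ",").getD []) 0 0
    simp only [zero_add] at h
    simpa [pvHex] using h
  | true =>
    have hb := pv_back_rel ((PySem.Str.split? line ",").getD []) 0 0
      (pvHex (pvSumQ ((PySem.Str.split? line ",").getD [])) (pvSumR ((PySem.Str.split? line ",").getD [])))
    have hf := pv_prefix_fold ((PySem.Str.split? line ",").getD []) 0 0
    simp only [zero_add] at hb hf
    rw [hb, hf]
    simp [pvHex]
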